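-- pv_equiv track=rewrite | github.com/Isilindil/adventOfCode2020 | day11/main.py | change_seat_in_view
-- ===== SOURCE A (Python) =====
-- def check_occupied_in_view(matrix_a, start_row, start_col, step_row, step_col) :
--     max_row = len(matrix_a)
--     max_col = len(matrix_a[start_row])
--     move_row = step_row
--     move_col = step_col
--     while 0 <= start_row+move_row < max_row and 0 <= start_col+move_col < max_col :
--         if matrix_a[start_row+move_row][start_col+move_col] == "L" :
--             return 0
--         elif matrix_a[start_row+move_row][start_col+move_col] == "#" :
--             return 1
--         else :
--             move_row += step_row
--             move_col += step_col
--     return 0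
--
-- def change_seat_in_view(matrix_a) :
--     matrix_b = []
--     nbr_of_row = len(matrix_a)
--     for row in range(nbr_of_row):
--         nbr_of_col = len(matrix_a[row])
--         matrix_b.append('')
--         for col in range(nbr_of_col):
--             if matrix_a[row][col] == '.':
--                 matrix_b[row] += '.'  # If floor, stay floor
--             else:
--                 nbr_of_occupied_around = 0
--                 for step_row, step_col in [(-1, -1), (-1, 0), (-1, +1), (0, -1), (0, +1), (+1, -1), (+1, 0), (+1, +1)] :
--                     nbr_of_occupied_around += check_occupied_in_view(matrix_a, row, col, step_row, step_col)
--                     #nbr_of_occupied_around += check_occupied_adjacent(matrix_a, row, col, step_row, step_col)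
--
--                 if matrix_a[row][col] == 'L' and nbr_of_occupied_around == 0:
--                     matrix_b[row] += '#'
--                 elif matrix_a[row][col] == '#' and nbr_of_occupied_around >= 5:
--                     matrix_b[row] += 'L'
--                 else:
--                     matrix_b[row] += matrix_a[row][col]
--     return matrix_b
-- ===== SOURCE B (Python) =====
-- # B: per-direction dynamic-programming sweeps compute the nearest visible seat for
-- # every cell in O(R*C) total, instead of A's per-cell ray walks (O(R*C*(R+C))).
--
-- def _vis_down(grid, dc):
--     # vis[r][c] = 1 iff the nearest seat seen from (r, c) looking in direction (+1, dc)
--     # is occupied ('#'); 0 if it is 'L' or no seat is visible. Computed bottom-up.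
--     vis = []
--     next_g = None
--     next_v = None
--     for row in reversed(grid):
--         if next_g is None:
--             cur = [0] * len(row)
--         else:
--             cur = []
--             for c in range(len(row)):
--                 cc = c + dc
--                 if 0 <= cc < len(next_g):
--                     ch = next_g[cc]
--                     cur.append(0 if ch == 'L' else 1 if ch == '#' else next_v[cc])
--                 else:
--                     cur.append(0)
--         vis.append(cur)
--         next_g = row
--         next_v = cur
--     vis.reverse()
--     return vis
--
-- def _vis_right(row):
--     # vis[c] for direction (0, +1) within one row, computed right-to-left.
--     out = []
--     nxt_ch = None
--     nxt_v = None
--     for ch in reversed(row):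
--         if nxt_ch is None:
--             v = 0
--         else:
--             v = 0 if nxt_ch == 'L' else 1 if nxt_ch == '#' else nxt_v
--         out.append(v)
--         nxt_ch = ch
--         nxt_v = v
--     out.reverse()
--     return out
--
-- def change_seat_in_view(matrix_a):
--     grid = matrix_a
--     rev = grid[::-1]
--     # the eight visibility matrices, in A's direction order
--     mats = [
--         list(reversed(_vis_down(rev, -1))),                       # (-1,-1)
--         list(reversed(_vis_down(rev, 0))),                        # (-1, 0)
--         list(reversed(_vis_down(rev, 1))),                        # (-1,+1)
--         [list(reversed(_vis_right(row[::-1]))) for row in grid],  # ( 0,-1)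
--         [_vis_right(row) for row in grid],                        # ( 0,+1)
--         _vis_down(grid, -1),                                      # (+1,-1)
--         _vis_down(grid, 0),                                       # (+1, 0)
--         _vis_down(grid, 1),                                       # (+1,+1)
--     ]
--
--     def cell(r, c):
--         ch = grid[r][c]
--         if ch == '.':
--             return '.'
--         n = sum(mat[r][c] for mat in mats)
--         if ch == 'L' and n == 0:
--             return '#'
--         if ch == '#' and n >= 5:
--             return 'L'
--         return ch
--
--     return [''.join(cell(r, c) for c in range(len(grid[r]))) for r in range(len(grid))]
-- ===== Notes on version B (the rewrite author's own statement) =====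
-- stated objective: faster
-- what changed: A walks a ray from every seat in each of the 8 directions (O(R*C*(R+C))); B precomputes, by one dynamic-programming sweep per direction, the nearest visible seat for all cells at once and then classifies each cell with a single count, O(R*C) total.
-- outside the precondition, e.g. on change_seat_in_view(['..', '.']): A returns ['..', '.'], B returns ['..', '.']
import Mathlib
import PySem

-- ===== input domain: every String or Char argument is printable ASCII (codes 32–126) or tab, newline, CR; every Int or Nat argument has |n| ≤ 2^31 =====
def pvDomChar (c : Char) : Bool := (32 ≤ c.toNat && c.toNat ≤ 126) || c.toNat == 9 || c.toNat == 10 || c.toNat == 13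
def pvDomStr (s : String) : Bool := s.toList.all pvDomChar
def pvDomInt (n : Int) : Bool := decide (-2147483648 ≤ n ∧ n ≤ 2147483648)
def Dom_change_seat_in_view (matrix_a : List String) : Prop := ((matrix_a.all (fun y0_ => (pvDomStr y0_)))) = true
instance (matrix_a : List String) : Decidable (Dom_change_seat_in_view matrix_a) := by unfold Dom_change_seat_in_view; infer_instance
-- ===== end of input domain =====

-- A = one step of the AoC 2020 day 11 part-2 (visibility) seat automaton.
-- B replaces A's per-cell ray walks by eight whole-grid directional sweeps (dynamic
-- programming on the nearest visible seat per direction); objective: faster.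

-- ===== PORT A =====

-- matrix_a[r] as a list of chars (every call site keeps 0 <= r < len(matrix_a))
def pvRowA (m : List String) (r : Int) : List Char :=
  ((PySem.List.pyGet? m r).getD "").toList
def pvCharA (m : List String) (r c : Int) : Char :=
  (PySem.List.pyGet? (pvRowA m r) c).getD ' '

def pvCcwLoop (m : List String) (maxRow maxCol sr sc dr dc : Int) : Int → Int → Nat → Int
  | _, _, 0 => 0
  | mr, mc, fuel+1 =>
    if 0 ≤ sr + mr ∧ sr + mr < maxRow ∧ 0 ≤ sc + mc ∧ sc + mc < maxCol then
      if pvCharA m (sr + mr) (sc + mc) = 'L' then 0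
      else if pvCharA m (sr + mr) (sc + mc) = '#' then 1
      else pvCcwLoop m maxRow maxCol sr sc dr dc (mr + dr) (mc + dc) fuel
    else 0
def check_occupied_in_view (m : List String) (sr sc dr dc : Int) : Int :=
  let maxRow : Int := m.length
  let maxCol : Int := ((pvRowA m sr).length : Int)
  pvCcwLoop m maxRow maxCol sr sc dr dc dr dc ((maxRow + maxCol).toNat + 2)

def pvDirs : List (Int × Int) :=
  [(-1, -1), (-1, 0), (-1, 1), (0, -1), (0, 1), (1, -1), (1, 0), (1, 1)]

def change_seat_in_view (matrix_a : List String) : List String :=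
  ((List.range matrix_a.length).foldl (fun mb (row : ℕ) =>
    let rowL := pvRowA matrix_a (row : Int)
    mb ++ [(List.range rowL.length).foldl (fun s (col : ℕ) =>
      if pvCharA matrix_a (row : Int) (col : Int) = '.' then s ++ ['.']
      else
        let n := pvDirs.foldl
          (fun acc d => acc + check_occupied_in_view matrix_a (row : Int) (col : Int) d.1 d.2) 0
        if pvCharA matrix_a (row : Int) (col : Int) = 'L' ∧ n = 0 then s ++ ['#']
        else if pvCharA matrix_a (row : Int) (col : Int) = '#' ∧ n ≥ 5 then s ++ ['L']
        else s ++ [pvCharA matrix_a (row : Int) (col : Int)]) []]) ([] : List (List Char))).map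
    (fun l => String.ofList l)


-- ===== PORT B =====

-- one row of the bottom-up sweep: what each cell sees looking at (+1, dc), given the
-- grid row below (nextG) and that row's already-computed visibility (nextV)
def pvVisRow (dc : Int) (rowLen : Nat) (nextG : Option (List Char)) (nextV : Option (List Int)) :
    List Int :=
  match nextG, nextV with
  | some g, some v =>
    (List.range rowLen).map (fun (c : ℕ) =>
      if 0 ≤ (c : Int) + dc ∧ (c : Int) + dc < (g.length : Int) then
        if g.getD ((c : Int) + dc).toNat ' ' = 'L' then 0
        else if g.getD ((c : Int) + dc).toNat ' ' = '#' then 1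
        else v.getD ((c : Int) + dc).toNat 0
      else 0)
  | _, _ => List.replicate rowLen 0

def pvVisDown (dc : Int) : List (List Char) → List (List Int)
  | [] => []
  | row :: rest =>
    let vs := pvVisDown dc rest
    pvVisRow dc row.length rest.head? vs.head? :: vs
def pvVisRight : List Char → List Int
  | [] => []
  | _ :: rest =>
    (match rest.head?, (pvVisRight rest).head? with
     | some b, v =>
       if b = 'L' then 0 else if b = '#' then 1 else v.getD 0
     | none, _ => 0) :: pvVisRight rest

def pvCellB (g : List (List Char)) (mats : List (List (List Int))) (r c : Nat) : Char :=
  let ch := (g.getD r []).getD c ' '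
  if ch = '.' then '.'
  else
    let n : Int := (mats.map (fun mat => (mat.getD r []).getD c 0)).sum
    if ch = 'L' ∧ n = 0 then '#'
    else if ch = '#' ∧ n ≥ 5 then 'L'
    else ch

def change_seat_in_view_alt (matrix_a : List String) : List String :=
  let g := matrix_a.map String.toList
  let rev := g.reverse
  let mats : List (List (List Int)) :=
    [(pvVisDown (-1) rev).reverse,
     (pvVisDown 0 rev).reverse,
     (pvVisDown 1 rev).reverse,
     g.map (fun row => (pvVisRight row.reverse).reverse),
     g.map (fun row => pvVisRight row),
     pvVisDown (-1) g,
     pvVisDown 0 g,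
     pvVisDown 1 g]
  (List.range g.length).map (fun r =>
    String.ofList ((List.range (g.getD r []).length).map (fun c => pvCellB g mats r c)))


-- ===== PRECONDITION & SPEC =====

-- Pre_ excludes ragged matrices (rows of unequal length): there A indexes short rows
-- through a longer start row's column bound and usually raises IndexError, and that
-- column bound (the start row's length) is an accident of the implementation.
def Pre_change_seat_in_view (matrix_a : List String) : Prop :=
  ∀ s ∈ matrix_a, PySem.Str.len s = PySem.Str.len (matrix_a.headD "")

instance (matrix_a : List String) : Decidable (Pre_change_seat_in_view matrix_a) := by
  unfold Pre_change_seat_in_view; infer_instance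

def pvWitness_change_seat_in_view : List String := ["L.", "#L"]

def Spec_change_seat_in_view (matrix_a : List String) (out : List String) : Prop :=
  out = change_seat_in_view_alt matrix_a
instance (matrix_a : List String) (out : List String) :
    Decidable (Spec_change_seat_in_view matrix_a out) := by
  unfold Spec_change_seat_in_view; infer_instance

-- ===== CLAIM (what is proved, stated in full; the proofs are below) =====
def Claim_equal_change_seat_in_view : Prop :=
  ∀ (matrix_a : List String), Dom_change_seat_in_view matrix_a →
    Pre_change_seat_in_view matrix_a →
    Spec_change_seat_in_view matrix_a (change_seat_in_view matrix_a)

-- ===== LEMMAS AND PROOFS =====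

def pvSpecDown (dc : Int) : List (List Char) → Int → Int
  | [], _ => 0
  | nrow :: rest, c =>
    if 0 ≤ c + dc ∧ c + dc < (nrow.length : Int) then
      if nrow.getD (c + dc).toNat ' ' = 'L' then 0
      else if nrow.getD (c + dc).toNat ' ' = '#' then 1
      else pvSpecDown dc rest (c + dc)
    else 0
def pvSpecRight : List Char → Int
  | [] => 0
  | ch :: rest =>
    if ch = 'L' then 0 else if ch = '#' then 1 else pvSpecRight rest

lemma pvRowA_eq (m : List String) (r : Int) (h0 : 0 ≤ r) (h1 : r < (m.length : Int)) :
    pvRowA m r = (m[r.toNat]'(by omega)).toList := by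
  simp [pvRowA, PySem.List.pyGet?_of_nonneg m h0,
    List.getElem?_eq_getElem (show r.toNat < m.length by omega)]

lemma pvCharA_eq (m : List String) (r c : Int) (h0 : 0 ≤ r) (h1 : r < (m.length : Int))
    (h2 : 0 ≤ c) (h3 : c < ((m[r.toNat]'(by omega)).toList.length : Int)) :
    pvCharA m r c = (m[r.toNat]'(by omega)).toList.getD c.toNat ' ' := by
  rw [pvCharA, pvRowA_eq m r h0 h1, PySem.List.pyGet?_of_nonneg _ h2,
    List.getElem?_eq_getElem (show c.toNat < _ by omega),
    List.getD_eq_getElem _ _ (show c.toNat < _ by omega)]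
  rfl

lemma pvLoop_down (m : List String) (C : ℕ) (hrect : ∀ s ∈ m, s.toList.length = C)
    (sr sc dc : Int) (hsr : 0 ≤ sr) :
    ∀ (fuel : ℕ) (mr mc : Int), 1 ≤ mr → (m.length : Int) - sr - mr < fuel →
      pvCcwLoop m m.length C sr sc 1 dc mr mc fuel =
        pvSpecDown dc ((m.map String.toList).drop (sr + mr).toNat) (sc + mc - dc) := by
  intro fuel
  induction fuel with
  | zero =>
    intro mr mc hmr hfuel
    rw [List.drop_eq_nil_of_le (by simp; omega)]
    rfl
  | succ fuel ih =>
    intro mr mc hmr hfuel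
    by_cases h : sr + mr < (m.length : Int)
    · have hk : (sr + mr).toNat < (m.map String.toList).length := by simp; omega
      rw [List.drop_eq_getElem_cons hk]
      have hrow : (m.map String.toList)[(sr + mr).toNat] = (m[(sr + mr).toNat]'(by simpa using hk)).toList := by
        simp
      have hC : ((m[(sr + mr).toNat]'(by simpa using hk)).toList.length : Int) = C := by
        have := hrect _ (List.getElem_mem (by simpa using hk))
        exact_mod_cast this
      rw [pvCcwLoop, pvSpecDown, hrow]
      have harith : sc + mc - dc + dc = sc + mc := by ring
      rw [harith, hC]
      by_cases hcol : 0 ≤ sc + mc ∧ sc + mc < (C : Int)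
      · rw [if_pos (by exact ⟨by omega, h, hcol.1, hcol.2⟩), if_pos hcol]
        rw [pvCharA_eq m (sr + mr) (sc + mc) (by omega) (by exact_mod_cast h) hcol.1 (by omega)]
        split_ifs with hL hH
        · rfl
        · rfl
        · rw [ih (mr + 1) (mc + dc) (by omega) (by omega)]
          have : (sr + (mr + 1)).toNat = (sr + mr).toNat + 1 := by omega
          rw [this]
          congr 1
          ring
      · rw [if_neg (by tauto), if_neg hcol]
    · rw [pvCcwLoop, if_neg (by omega), List.drop_eq_nil_of_le (by simp; omega)]
      rfl
lemma pvTakeRev {α : Type} (l : List α) (k : Nat) (h : k < l.length) :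
    (l.take (k+1)).reverse = l[k] :: (l.take k).reverse := by
  rw [List.take_add_one, List.getElem?_eq_getElem h]
  simp

lemma pvLoop_up (m : List String) (C : ℕ) (hrect : ∀ s ∈ m, s.toList.length = C)
    (sr sc dc : Int) (hsr2 : sr < (m.length : Int)) :
    ∀ (fuel : ℕ) (mr mc : Int), mr ≤ -1 → sr + mr + 1 < fuel →
      pvCcwLoop m m.length C sr sc (-1) dc mr mc fuel =
        pvSpecDown dc (((m.map String.toList).take (sr + mr + 1).toNat).reverse) (sc + mc - dc) := by
  intro fuel
  induction fuel with
  | zero =>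
    intro mr mc hmr hfuel
    rw [show (sr + mr + 1).toNat = 0 by omega]
    rfl
  | succ fuel ih =>
    intro mr mc hmr hfuel
    by_cases h : 0 ≤ sr + mr
    · have hk : (sr + mr).toNat < (m.map String.toList).length := by simp; omega
      rw [show (sr + mr + 1).toNat = (sr + mr).toNat + 1 by omega,
        pvTakeRev _ _ hk]
      have hrow : (m.map String.toList)[(sr + mr).toNat] = (m[(sr + mr).toNat]'(by simpa using hk)).toList := by
        simp
      have hC : ((m[(sr + mr).toNat]'(by simpa using hk)).toList.length : Int) = C := by
        have := hrect _ (List.getElem_mem (by simpa using hk))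
        exact_mod_cast this
      rw [pvCcwLoop, pvSpecDown, hrow]
      have harith : sc + mc - dc + dc = sc + mc := by ring
      rw [harith, hC]
      by_cases hcol : 0 ≤ sc + mc ∧ sc + mc < (C : Int)
      · rw [if_pos (by exact ⟨h, by omega, hcol.1, hcol.2⟩), if_pos hcol]
        rw [pvCharA_eq m (sr + mr) (sc + mc) h (by omega) hcol.1 (by omega)]
        split_ifs with hL hH
        · rfl
        · rfl
        · rw [ih (mr + -1) (mc + dc) (by omega) (by omega)]
          have : (sr + (mr + -1) + 1).toNat = (sr + mr).toNat := by omega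
          rw [this]
          congr 1
          ring
      · rw [if_neg (by tauto), if_neg hcol]
    · rw [pvCcwLoop, if_neg (by omega), show (sr + mr + 1).toNat = 0 by omega]
      rfl
lemma pvLoop_right (m : List String) (C : ℕ) (sr sc : Int)
    (h0 : 0 ≤ sr) (h1 : sr < (m.length : Int))
    (hC : (m[sr.toNat]'(by omega)).toList.length = C) (hsc : 0 ≤ sc) :
    ∀ (fuel : ℕ) (mc : Int), 1 ≤ mc → (C : Int) - sc - mc < fuel →
      pvCcwLoop m m.length C sr sc 0 1 0 mc fuel =
        pvSpecRight ((m[sr.toNat]'(by omega)).toList.drop (sc + mc).toNat) := by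
  intro fuel
  induction fuel with
  | zero =>
    intro mc hmc hfuel
    rw [List.drop_eq_nil_of_le (by omega)]
    rfl
  | succ fuel ih =>
    intro mc hmc hfuel
    by_cases hcol : sc + mc < (C : Int)
    · have hk : (sc + mc).toNat < (m[sr.toNat]'(by omega)).toList.length := by omega
      rw [pvCcwLoop, List.drop_eq_getElem_cons hk, pvSpecRight,
        if_pos (by refine ⟨by omega, by omega, by omega, by omega⟩)]
      rw [show sr + 0 = sr by ring,
        pvCharA_eq m sr (sc + mc) h0 h1 (by omega) (by omega),
        List.getD_eq_getElem _ _ hk]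
      split_ifs with hL hH
      · rfl
      · rfl
      · rw [show (0:Int) + 0 = 0 by ring, ih (mc + 1) (by omega) (by omega), show sc + (mc + 1) = sc + mc + 1 by ring,
          show (sc + mc + 1).toNat = (sc + mc).toNat + 1 by omega]
    · rw [pvCcwLoop, if_neg (by omega), List.drop_eq_nil_of_le (by omega)]
      rfl

lemma pvLoop_left (m : List String) (C : ℕ) (sr sc : Int)
    (h0 : 0 ≤ sr) (h1 : sr < (m.length : Int))
    (hC : (m[sr.toNat]'(by omega)).toList.length = C) (hsc2 : sc < (C : Int)) :
    ∀ (fuel : ℕ) (mc : Int), mc ≤ -1 → sc + mc + 1 < fuel →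
      pvCcwLoop m m.length C sr sc 0 (-1) 0 mc fuel =
        pvSpecRight (((m[sr.toNat]'(by omega)).toList.take (sc + mc + 1).toNat).reverse) := by
  intro fuel
  induction fuel with
  | zero =>
    intro mc hmc hfuel
    rw [show (sc + mc + 1).toNat = 0 by omega]
    rfl
  | succ fuel ih =>
    intro mc hmc hfuel
    by_cases hcol : 0 ≤ sc + mc
    · have hk : (sc + mc).toNat < (m[sr.toNat]'(by omega)).toList.length := by omega
      rw [pvCcwLoop, show (sc + mc + 1).toNat = (sc + mc).toNat + 1 by omega,
        pvTakeRev _ _ hk, pvSpecRight,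
        if_pos (by refine ⟨by omega, by omega, by omega, by omega⟩)]
      rw [show sr + 0 = sr by ring,
        pvCharA_eq m sr (sc + mc) h0 h1 (by omega) (by omega),
        List.getD_eq_getElem _ _ hk]
      split_ifs with hL hH
      · rfl
      · rfl
      · rw [show (0:Int) + 0 = 0 by ring, ih (mc + -1) (by omega) (by omega),
          show (sc + (mc + -1) + 1).toNat = (sc + mc).toNat by omega]
    · rw [pvCcwLoop, if_neg (by omega), show (sc + mc + 1).toNat = 0 by omega]
      rfl

lemma pvCheck_down (m : List String) (C : ℕ) (hrect : ∀ s ∈ m, s.toList.length = C)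
    (r c : ℕ) (hr : r < m.length) (dc : Int) :
    check_occupied_in_view m r c 1 dc =
      pvSpecDown dc ((m.map String.toList).drop (r + 1)) c := by
  have hrow : pvRowA m r = (m[r]'hr).toList := by
    simpa using pvRowA_eq m r (by omega) (by omega)
  have hC : (pvRowA m r).length = C := by
    rw [hrow]; exact hrect _ (List.getElem_mem hr)
  rw [check_occupied_in_view]
  simp only [hC]
  rw [pvLoop_down m C hrect r c dc (by omega) _ 1 dc (by omega) (by omega)]
  rw [show ((r : Int) + 1).toNat = r + 1 by omega]
  congr 1
  ring

lemma pvCheck_up (m : List String) (C : ℕ) (hrect : ∀ s ∈ m, s.toList.length = C)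
    (r c : ℕ) (hr : r < m.length) (dc : Int) :
    check_occupied_in_view m r c (-1) dc =
      pvSpecDown dc (((m.map String.toList).take r).reverse) c := by
  have hrow : pvRowA m r = (m[r]'hr).toList := by
    simpa using pvRowA_eq m r (by omega) (by omega)
  have hC : (pvRowA m r).length = C := by
    rw [hrow]; exact hrect _ (List.getElem_mem hr)
  rw [check_occupied_in_view]
  simp only [hC]
  rw [pvLoop_up m C hrect r c dc (by omega) _ (-1) dc (by omega) (by omega)]
  rw [show ((r : Int) + -1 + 1).toNat = r by omega]
  congr 1
  ring

lemma pvCheck_right (m : List String) (C : ℕ) (hrect : ∀ s ∈ m, s.toList.length = C)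
    (r c : ℕ) (hr : r < m.length) :
    check_occupied_in_view m r c 0 1 =
      pvSpecRight ((m[r]'hr).toList.drop (c + 1)) := by
  have hrow : pvRowA m r = (m[r]'hr).toList := by
    simpa using pvRowA_eq m r (by omega) (by omega)
  have hC : (pvRowA m r).length = C := by
    rw [hrow]; exact hrect _ (List.getElem_mem hr)
  rw [check_occupied_in_view]
  simp only [hC]
  rw [pvLoop_right m C r c (by omega) (by omega) (by simp only [Int.toNat_natCast]; rw [← hrow]; exact hC) (by omega)
      _ 1 (by omega) (by omega)]
  rw [show ((c : Int) + 1).toNat = c + 1 by omega]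
  simp

lemma pvCheck_left (m : List String) (C : ℕ) (hrect : ∀ s ∈ m, s.toList.length = C)
    (r c : ℕ) (hr : r < m.length) (hc : c < C) :
    check_occupied_in_view m r c 0 (-1) =
      pvSpecRight (((m[r]'hr).toList.take c).reverse) := by
  have hrow : pvRowA m r = (m[r]'hr).toList := by
    simpa using pvRowA_eq m r (by omega) (by omega)
  have hC : (pvRowA m r).length = C := by
    rw [hrow]; exact hrect _ (List.getElem_mem hr)
  rw [check_occupied_in_view]
  simp only [hC]
  rw [pvLoop_left m C r c (by omega) (by omega) (by simp only [Int.toNat_natCast]; rw [← hrow]; exact hC) (by omega)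
      _ (-1) (by omega) (by omega)]
  rw [show ((c : Int) + -1 + 1).toNat = c by omega]
  simp

lemma pvVisDown_length (dc : Int) (g : List (List Char)) :
    (pvVisDown dc g).length = g.length := by
  induction g with
  | nil => rfl
  | cons row rest ih => simp [pvVisDown, ih]

lemma pvVisRight_length (row : List Char) :
    (pvVisRight row).length = row.length := by
  induction row with
  | nil => rfl
  | cons a rest ih => simp [pvVisRight, ih]

lemma pvVisRow_get (dc : Int) (g : List Char) (v : List Int) (rowLen c : ℕ)
    (hc : c < rowLen) :
    (pvVisRow dc rowLen (some g) (some v)).getD c 0 =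
      (if 0 ≤ (c : Int) + dc ∧ (c : Int) + dc < (g.length : Int) then
        if g.getD ((c : Int) + dc).toNat ' ' = 'L' then 0
        else if g.getD ((c : Int) + dc).toNat ' ' = '#' then 1
        else v.getD ((c : Int) + dc).toNat 0
      else 0) := by
  rw [pvVisRow, List.getD_eq_getElem _ _ (by simpa using hc)]
  simp

lemma pvVisDown_get (dc : Int) (C : ℕ) :
    ∀ (g : List (List Char)), (∀ row ∈ g, row.length = C) →
    ∀ (r c : ℕ), r < g.length → c < C →
      ((pvVisDown dc g).getD r []).getD c 0 = pvSpecDown dc (g.drop (r + 1)) c := by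
  intro g
  induction g with
  | nil => intro _ r c hr; simp at hr
  | cons row rest ih =>
    intro hrect r c hr hc
    cases r with
    | succ r =>
      simp only [pvVisDown, List.getD_cons_succ, List.drop_succ_cons]
      exact ih (fun x hx => hrect x (List.mem_cons_of_mem _ hx)) r c (by simpa using hr) hc
    | zero =>
      have hrowC : row.length = C := hrect row List.mem_cons_self
      simp only [pvVisDown, List.getD_cons_zero, List.drop_succ_cons, List.drop_zero]
      cases rest with
      | nil =>
        simp [pvVisRow, pvSpecDown]
      | cons nrow rest2 =>
        have hnrowC : nrow.length = C := hrect nrow (by simp)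
        simp only [pvVisDown, List.head?_cons]
        rw [pvVisRow_get _ _ _ _ _ (by omega)]
        simp only [pvSpecDown]
        by_cases hcol : 0 ≤ (c : Int) + dc ∧ (c : Int) + dc < ((nrow.length : ℕ) : Int)
        · rw [if_pos hcol, if_pos hcol]
          split_ifs with hL hH
          · rfl
          · rfl
          · have hcc : ((c : Int) + dc).toNat < C := by omega
            have h2 := ih (fun x hx => hrect x (List.mem_cons_of_mem _ hx)) 0
              ((c : Int) + dc).toNat (by simp) hcc
            simp only [pvVisDown, List.getD_cons_zero, List.drop_succ_cons, List.drop_zero] at h2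
            rw [h2]
            congr 1
            omega
        · rw [if_neg hcol, if_neg hcol]

lemma pvVisRight_get :
    ∀ (row : List Char) (c : ℕ), c < row.length →
      (pvVisRight row).getD c 0 = pvSpecRight (row.drop (c + 1)) := by
  intro row
  induction row with
  | nil => intro c hc; simp at hc
  | cons a rest ih =>
    intro c hc
    cases c with
    | succ c =>
      simp only [pvVisRight, List.getD_cons_succ, List.drop_succ_cons]
      exact ih c (by simpa using hc)
    | zero =>
      simp only [List.drop_succ_cons, List.drop_zero]
      cases rest with
      | nil => simp [pvVisRight, pvSpecRight]
      | cons b r2 =>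
        have hb := ih 0 (by simp)
        simp only [List.drop_succ_cons, List.drop_zero] at hb
        simp only [pvVisRight, List.head?_cons, List.getD_cons_zero, Option.getD_some] at hb ⊢
        simp only [pvSpecRight]
        split_ifs
        · rfl
        · rfl
        · exact hb
lemma pvGetD_reverse {α : Type} (l : List α) (r : ℕ) (d : α) (h : r < l.length) :
    l.reverse.getD r d = l.getD (l.length - 1 - r) d := by
  rw [List.getD_eq_getElem _ _ (by simpa using h), List.getElem_reverse,
    List.getD_eq_getElem _ _ (by omega)]

lemma pvUp_get (dc : Int) (C : ℕ) (g : List (List Char)) (hrect : ∀ row ∈ g, row.length = C)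
    (r c : ℕ) (hr : r < g.length) (hc : c < C) :
    (((pvVisDown dc g.reverse).reverse).getD r []).getD c 0 =
      pvSpecDown dc ((g.take r).reverse) c := by
  rw [pvGetD_reverse _ _ _ (by rw [pvVisDown_length]; simpa using hr),
    pvVisDown_length]
  rw [pvVisDown_get dc C g.reverse (fun row hrow => hrect row (List.mem_reverse.mp hrow))
    (g.reverse.length - 1 - r) c (by simp; omega) hc]
  rw [List.drop_reverse]
  congr 2
  simp
  omega

lemma pvLeft_get (C : ℕ) (row : List Char) (hC : row.length = C) (c : ℕ) (hc : c < C) :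
    ((pvVisRight row.reverse).reverse).getD c 0 = pvSpecRight ((row.take c).reverse) := by
  rw [pvGetD_reverse _ _ _ (by rw [pvVisRight_length]; simp; omega)]
  rw [pvVisRight_length]
  rw [pvVisRight_get _ _ (by simp; omega)]
  rw [List.drop_reverse]
  congr 2
  simp
  omega

def pvCellA (m : List String) (row col : ℕ) : Char :=
  if pvCharA m (row : Int) (col : Int) = '.' then '.'
  else
    let n := pvDirs.foldl
      (fun acc d => acc + check_occupied_in_view m (row : Int) (col : Int) d.1 d.2) 0
    if pvCharA m (row : Int) (col : Int) = 'L' ∧ n = 0 then '#'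
    else if pvCharA m (row : Int) (col : Int) = '#' ∧ n ≥ 5 then 'L'
    else pvCharA m (row : Int) (col : Int)

def pvMats (g : List (List Char)) : List (List (List Int)) :=
  [(pvVisDown (-1) g.reverse).reverse,
   (pvVisDown 0 g.reverse).reverse,
   (pvVisDown 1 g.reverse).reverse,
   g.map (fun row => (pvVisRight row.reverse).reverse),
   g.map (fun row => pvVisRight row),
   pvVisDown (-1) g,
   pvVisDown 0 g,
   pvVisDown 1 g]

lemma pvCell_eq (m : List String) (C : ℕ) (hrect : ∀ s ∈ m, s.toList.length = C)
    (r c : ℕ) (hr : r < m.length) (hc : c < C) :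
    pvCellA m r c = pvCellB (m.map String.toList) (pvMats (m.map String.toList)) r c := by
  have hg : r < (m.map String.toList).length := by simpa using hr
  have hrowg : (m.map String.toList).getD r [] = (m[r]'hr).toList := by
    rw [List.getD_eq_getElem _ _ hg, List.getElem_map]
  have hrectg : ∀ row ∈ m.map String.toList, row.length = C := by
    intro row hrow
    obtain ⟨s, hs, rfl⟩ := List.mem_map.mp hrow
    exact hrect s hs
  have hrowC : (m[r]'hr).toList.length = C := hrect _ (List.getElem_mem hr)
  have h4 : ((c : Int)) < ((m[((r : Int)).toNat]'(by omega)).toList.length : Int) := by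
    simp only [Int.toNat_natCast]
    omega
  have hch : pvCharA m (r : Int) (c : Int) = ((m.map String.toList).getD r []).getD c ' ' := by
    rw [pvCharA_eq m r c (by omega) (by omega) (by omega) h4, hrowg]
    simp
  have hmapL : ((m.map String.toList).map (fun row => (pvVisRight row.reverse).reverse)).getD r []
      = (pvVisRight ((m[r]'hr).toList).reverse).reverse := by
    rw [List.getD_eq_getElem _ _ (by simpa using hr), List.getElem_map, List.getElem_map]
  have hmapR : ((m.map String.toList).map (fun row => pvVisRight row)).getD r []
      = pvVisRight ((m[r]'hr).toList) := by
    rw [List.getD_eq_getElem _ _ (by simpa using hr), List.getElem_map, List.getElem_map]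
  have hn :
      pvDirs.foldl
        (fun acc d => acc + check_occupied_in_view m (r : Int) (c : Int) d.1 d.2) 0 =
      ((pvMats (m.map String.toList)).map
        (fun mat => (mat.getD r []).getD c 0)).sum := by
    simp only [pvDirs, List.foldl_cons, List.foldl_nil, pvMats, List.map_cons, List.map_nil,
      List.sum_cons, List.sum_nil]
    rw [pvCheck_up m C hrect r c hr (-1), pvCheck_up m C hrect r c hr 0,
      pvCheck_up m C hrect r c hr 1,
      pvCheck_left m C hrect r c hr hc, pvCheck_right m C hrect r c hr,
      pvCheck_down m C hrect r c hr (-1), pvCheck_down m C hrect r c hr 0,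
      pvCheck_down m C hrect r c hr 1]
    rw [pvUp_get (-1) C _ hrectg r c hg hc, pvUp_get 0 C _ hrectg r c hg hc,
      pvUp_get 1 C _ hrectg r c hg hc, hmapL, hmapR,
      pvLeft_get C _ hrowC c hc, pvVisRight_get _ c (by omega),
      pvVisDown_get (-1) C _ hrectg r c hg hc, pvVisDown_get 0 C _ hrectg r c hg hc,
      pvVisDown_get 1 C _ hrectg r c hg hc]
    ring
  rw [pvCellA, pvCellB, hch, hn]

lemma pvA_map (m : List String) :
    change_seat_in_view m =
      (List.range m.length).map (fun (row : ℕ) =>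
        String.ofList ((List.range (pvRowA m (row : Int)).length).map
          (fun col => pvCellA m row col))) := by
  rw [change_seat_in_view]
  have houter :
      (fun (mb : List (List Char)) (row : ℕ) =>
        let rowL := pvRowA m (row : Int)
        mb ++ [(List.range rowL.length).foldl (fun s (col : ℕ) =>
          if pvCharA m (row : Int) (col : Int) = '.' then s ++ ['.']
          else
            let n := pvDirs.foldl
              (fun acc d => acc + check_occupied_in_view m (row : Int) (col : Int) d.1 d.2) 0
            if pvCharA m (row : Int) (col : Int) = 'L' ∧ n = 0 then s ++ ['#']
            else if pvCharA m (row : Int) (col : Int) = '#' ∧ n ≥ 5 then s ++ ['L']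
            else s ++ [pvCharA m (row : Int) (col : Int)]) []]) =
      (fun (mb : List (List Char)) (row : ℕ) => mb ++ [(List.range (pvRowA m (row : Int)).length).map
        (fun (col : ℕ) => pvCellA m row col)]) := by
    funext mb row
    show mb ++ [_] = mb ++ [_]
    have hf : (fun (s : List Char) (col : ℕ) =>
        if pvCharA m (row : Int) (col : Int) = '.' then s ++ ['.']
        else
          let n := pvDirs.foldl
            (fun acc d => acc + check_occupied_in_view m (row : Int) (col : Int) d.1 d.2) 0
          if pvCharA m (row : Int) (col : Int) = 'L' ∧ n = 0 then s ++ ['#']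
          else if pvCharA m (row : Int) (col : Int) = '#' ∧ n ≥ 5 then s ++ ['L']
          else s ++ [pvCharA m (row : Int) (col : Int)]) =
        (fun s col => s ++ [pvCellA m row col]) := by
      funext s col
      rw [pvCellA]
      split_ifs with h1
      · rfl
      · simp only []
        split_ifs <;> rfl
    rw [hf, PySem.List.foldl_append_singleton_eq_map]
    simp
  rw [houter, PySem.List.foldl_append_singleton_eq_map]
  simp

theorem pv_main (m : List String) (hrect0 : ∀ s ∈ m, PySem.Str.len s = PySem.Str.len (m.headD "")) :
    change_seat_in_view m = change_seat_in_view_alt m := by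
  have hrect : ∀ s ∈ m, s.toList.length = (m.headD "").toList.length := by
    intro s hs
    have := hrect0 s hs
    rw [PySem.Str.len_eq, PySem.Str.len_eq] at this
    exact_mod_cast this
  set C := (m.headD "").toList.length with hCdef
  rw [pvA_map, change_seat_in_view_alt]
  apply List.ext_getElem
  · simp
  · intro r h1 h2
    simp only [List.getElem_map, List.getElem_range]
    have hr : r < m.length := by simpa using h1
    congr 1
    have hrowg : (m.map String.toList).getD r [] = (m[r]'hr).toList := by
      rw [List.getD_eq_getElem _ _ (by simpa using hr), List.getElem_map]
    have hrowA : pvRowA m (r : Int) = (m[r]'hr).toList := by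
      simpa using pvRowA_eq m r (by omega) (by exact_mod_cast hr)
    rw [hrowg, hrowA]
    apply List.map_congr_left
    intro c hcmem
    have hc : c < C := by
      have := List.mem_range.mp hcmem
      have := hrect _ (List.getElem_mem hr)
      omega
    exact pvCell_eq m C hrect r c hr hc

-- ===== VERDICT (by name: the statement is the Claim_ definition above) =====
theorem change_seat_in_view_spec : Claim_equal_change_seat_in_view := by
  intro m _hdom hpre
  show change_seat_in_view m = change_seat_in_view_alt m
  exact pv_main m hpre
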